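-- pv_equiv track=rewrite | github.com/quockhanh112hubt/Check_All_Stages | refactor_db_connections.py | add_import_statement
-- ===== SOURCE A (Python) =====
-- def add_import_statement(content):
--     """Add import statement after cx_Oracle import"""
--     lines = content.split('\n')
--     new_lines = []
--     import_added = False
--
--     for line in lines:
--         new_lines.append(line)
--         if 'import cx_Oracle' in line and not import_added:
--             new_lines.append('from utils.db_config import get_db_connection')
--             import_added = True
--
--     return '\n'.join(new_lines)
-- ===== SOURCE B (Python) =====
-- def add_import_statement(content):
--     """Add import statement after cx_Oracle import"""
--     lines = content.split('\n')
--     i = next((i for i, l in enumerate(lines) if 'import cx_Oracle' in l), None)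
--     if i is None:
--         return '\n'.join(lines)
--     return '\n'.join(lines[:i + 1]
--                      + ['from utils.db_config import get_db_connection']
--                      + lines[i + 1:])
-- ===== Notes on version B (the rewrite author's own statement) =====
-- stated objective: simpler
-- what changed: Replaced the single-pass accumulator-plus-flag scan with a locate-then-splice structure: find the index of the first matching line, then join the slices around the inserted import line.
import Mathlib
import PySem

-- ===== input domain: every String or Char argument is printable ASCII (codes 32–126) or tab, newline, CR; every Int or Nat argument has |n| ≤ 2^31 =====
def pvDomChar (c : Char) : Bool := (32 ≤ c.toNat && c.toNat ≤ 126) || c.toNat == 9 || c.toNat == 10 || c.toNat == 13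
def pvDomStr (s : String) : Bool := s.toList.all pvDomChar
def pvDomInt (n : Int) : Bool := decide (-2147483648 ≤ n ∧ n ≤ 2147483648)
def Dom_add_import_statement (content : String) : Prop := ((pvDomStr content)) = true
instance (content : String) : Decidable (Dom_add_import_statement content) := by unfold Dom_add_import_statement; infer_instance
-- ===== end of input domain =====

-- B replaces A's append-while-scanning accumulator with a matched-yet flag by locate-first-matching-line-then-splice (simpler decomposition).

-- ===== PORT A =====
-- loop body of A's for-loop: append the line; after the first line containing the
-- substring (flag st.2 still false), also append the import line and set the flag
def pvStepA (st : List String × Bool) (line : String) : List String × Bool :=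
  let nl := st.1 ++ [line]
  if PySem.Str.isIn "import cx_Oracle" line && !st.2 then
    (nl ++ ["from utils.db_config import get_db_connection"], true)
  else (nl, st.2)

def add_import_statement (content : String) : String :=
  -- content.split('\n'): sep is the nonempty literal "\n", so split? is always some (exact)
  let lines := (PySem.Str.split? content "\n").getD []
  PySem.Str.join "\n" (lines.foldl pvStepA ([], false)).1

-- ===== PORT B =====
def add_import_statement_alt (content : String) : String :=
  -- content.split('\n'): sep is the nonempty literal "\n", so split? is always some (exact)
  let lines := (PySem.Str.split? content "\n").getD []
  match lines.findIdx? (fun l => PySem.Str.isIn "import cx_Oracle" l) with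
  | none => PySem.Str.join "\n" lines
  | some i => PySem.Str.join "\n"
      (lines.take (i + 1) ++ ["from utils.db_config import get_db_connection"] ++ lines.drop (i + 1))

-- ===== PRECONDITION & SPEC =====
def Spec_add_import_statement (content : String) (out : String) : Prop := out = add_import_statement_alt content
instance (content : String) (out : String) : Decidable (Spec_add_import_statement content out) := by unfold Spec_add_import_statement; infer_instance

-- ===== CLAIM (what is proved, stated in full; the proofs are below) =====
def Claim_equal_add_import_statement : Prop := ∀ (content : String), Dom_add_import_statement content → Spec_add_import_statement content (add_import_statement content)

-- ===== LEMMAS AND PROOFS =====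

theorem pvStepA_true (acc : List String) (l : String) : pvStepA (acc, true) l = (acc ++ [l], true) := by
  simp [pvStepA]

theorem pvStepA_hit (acc : List String) (l : String) (h : PySem.Str.isIn "import cx_Oracle" l = true) :
    pvStepA (acc, false) l = (acc ++ [l] ++ ["from utils.db_config import get_db_connection"], true) := by
  unfold pvStepA; rw [h]; simp

theorem pvStepA_miss (acc : List String) (l : String) (h : PySem.Str.isIn "import cx_Oracle" l = false) :
    pvStepA (acc, false) l = (acc ++ [l], false) := by
  unfold pvStepA; rw [h]; simp

-- once the flag is set, A's loop only appends the remaining lines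
theorem pv_loop_true (ls : List String) (acc : List String) :
    ls.foldl pvStepA (acc, true) = (acc ++ ls, true) := by
  induction ls generalizing acc with
  | nil => simp
  | cons l ls ih => rw [List.foldl_cons, pvStepA_true, ih]; simp

-- with the flag clear, A's loop builds exactly B's splice around the first match index
theorem pv_loop_false (ls : List String) (acc : List String) :
    (ls.foldl pvStepA (acc, false)).1 =
    acc ++ (match ls.findIdx? (fun l => PySem.Str.isIn "import cx_Oracle" l) with
      | none => ls
      | some i => ls.take (i + 1) ++ ["from utils.db_config import get_db_connection"] ++ ls.drop (i + 1)) := by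
  induction ls generalizing acc with
  | nil => simp
  | cons l ls ih =>
    cases h : PySem.Str.isIn "import cx_Oracle" l with
    | true =>
      rw [List.foldl_cons, pvStepA_hit _ _ h, pv_loop_true]
      simp only [List.findIdx?_cons, h]
      simp
    | false =>
      rw [List.foldl_cons, pvStepA_miss _ _ h, ih]
      simp only [List.findIdx?_cons, h, Bool.false_eq_true, if_false]
      cases hf : ls.findIdx? (fun l => PySem.Str.isIn "import cx_Oracle" l) <;> simp

-- ===== VERDICT (by name: the statement is the Claim_ definition above) =====
theorem add_import_statement_spec : Claim_equal_add_import_statement := by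
  intro content _
  unfold Spec_add_import_statement add_import_statement add_import_statement_alt
  simp only [pv_loop_false]
  cases ((PySem.Str.split? content "\n").getD []).findIdx? (fun l => PySem.Str.isIn "import cx_Oracle" l) <;> simp
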